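-- pv_equiv track=rewrite | github.com/berserkarch/berserk-extra-src | berserk-conky/conky/scripts/netmon.py | prioritize_connections
-- ===== SOURCE A (Python) =====
-- def prioritize_connections(connections):
--     """Prioritize connections: ESTAB > LISTEN > UDP > OTHER, limit to 5 total"""
--     established = [c for c in connections if c['state'] == 'ESTAB']
--     listening = [c for c in connections if c['state'] == 'LISTEN']
--     udp_conns = [c for c in connections if c['state'] == 'UDP']
--     other = [c for c in connections if c['state'] == 'OTHER']
--
--     result = []
--
--     # Priority 1: Established TCP connections (active threats/communications)
--     if established:
--         result.extend(established[:3])  # Max 3 established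
--
--     # Priority 2: Listening services (attack surface)
--     if len(result) < 5 and listening:
--         needed = 5 - len(result)
--         result.extend(listening[:needed])
--
--     # Priority 3: UDP connections (DNS, etc.)
--     if len(result) < 5 and udp_conns:
--         needed = 5 - len(result)
--         result.extend(udp_conns[:needed])
--
--     # Priority 4: Other TCP states
--     if len(result) < 5 and other:
--         needed = 5 - len(result)
--         result.extend(other[:needed])
--
--     return result[:5]
-- ===== SOURCE B (Python) =====
-- ORDER = ('ESTAB', 'LISTEN', 'UDP', 'OTHER')
--
-- def prioritize_connections(connections):
--     """Prioritize connections: ESTAB > LISTEN > UDP > OTHER, limit to 5 total"""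
--     ranked = sorted((c for c in connections if c['state'] in ORDER),
--                     key=lambda c: ORDER.index(c['state']))
--     out, estab = [], 0
--     for c in ranked:
--         if len(out) == 5:
--             break
--         if c['state'] == 'ESTAB':
--             if estab == 3:
--                 continue
--             estab += 1
--         out.append(c)
--     return out
-- ===== Notes on version B (the rewrite author's own statement) =====
-- stated objective: alternative
-- what changed: Replaces A's four per-state filtering scans plus four staged if-guarded fill blocks with a stable sort of the recognised connections by a priority rank and one scan over the sorted list that caps ESTAB at 3 and breaks at 5.
import Mathlib
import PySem

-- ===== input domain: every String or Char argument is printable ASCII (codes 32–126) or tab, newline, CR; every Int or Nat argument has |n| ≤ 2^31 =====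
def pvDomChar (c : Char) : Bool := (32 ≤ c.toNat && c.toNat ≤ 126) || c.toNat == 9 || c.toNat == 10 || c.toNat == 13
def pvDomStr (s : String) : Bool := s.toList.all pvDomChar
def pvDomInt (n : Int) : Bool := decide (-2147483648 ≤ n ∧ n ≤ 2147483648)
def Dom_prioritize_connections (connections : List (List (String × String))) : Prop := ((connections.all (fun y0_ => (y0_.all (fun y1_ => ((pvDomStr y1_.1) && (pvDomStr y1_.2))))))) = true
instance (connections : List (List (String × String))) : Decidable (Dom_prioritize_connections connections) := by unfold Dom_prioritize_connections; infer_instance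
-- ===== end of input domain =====

-- B replaces A's four per-state filtering scans + four staged fill blocks by a stable sort on a
-- priority rank followed by a single capped scan (objective: alternative, not claimed faster).

-- ===== PORT A =====
-- shared lookup helper: Python's c['state'] (a dict lookup; KeyError = none, excluded by Pre_)
def pvState (c : List (String × String)) : Option String := (PySem.Dict.mk c).get? "state"

def prioritize_connections (connections : List (List (String × String))) : List (List (String × String)) :=
  let established := connections.filter (fun c => pvState c == some "ESTAB")
  let listening := connections.filter (fun c => pvState c == some "LISTEN")
  let udp_conns := connections.filter (fun c => pvState c == some "UDP")
  let other := connections.filter (fun c => pvState c == some "OTHER")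
  let result : List (List (String × String)) := []
  let result := if established ≠ [] then result ++ PySem.List.slice established none (some 3) else result
  let result := if result.length < 5 ∧ listening ≠ [] then
      result ++ PySem.List.slice listening none (some (5 - (result.length : Int))) else result
  let result := if result.length < 5 ∧ udp_conns ≠ [] then
      result ++ PySem.List.slice udp_conns none (some (5 - (result.length : Int))) else result
  let result := if result.length < 5 ∧ other ≠ [] then
      result ++ PySem.List.slice other none (some (5 - (result.length : Int))) else result
  PySem.List.slice result none (some 5)

-- ===== PORT B =====
-- the ORDER tuple of Source B
def pcOrder : List String := ["ESTAB", "LISTEN", "UDP", "OTHER"]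

-- Source B's sort key: ORDER.index(c['state']).  It is only applied to connections whose state is a
-- member of ORDER (the generator filters first), so .index's ValueError and the KeyError branch
-- are unreachable there; the defaults below are never observed by the sort.
def pcKey (c : List (String × String)) : Int :=
  match pvState c with
  | some s => (((PySem.List.index? pcOrder s).getD 0 : Nat) : Int)
  | none => 0

-- Source B's for-loop with break/continue, as structural recursion over (ranked, out, estab)
def pcScan : List (List (String × String)) → List (List (String × String)) → Nat →
    List (List (String × String))
  | [], out, _ => out
  | c :: t, out, estab =>
    if out.length = 5 then out        -- break
    else if pvState c == some "ESTAB" then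
      if estab = 3 then pcScan t out estab   -- continue
      else pcScan t (out ++ [c]) (estab + 1)
    else pcScan t (out ++ [c]) estab

def prioritize_connections_alt (connections : List (List (String × String))) :
    List (List (String × String)) :=
  let ranked := PySem.List.sorted
    (connections.filter (fun c => match pvState c with | some s => pcOrder.contains s | none => false))
    pcKey
  pcScan ranked [] 0

-- ===== PRECONDITION & SPEC =====
-- Pre_ excludes exactly the inputs where Python A raises KeyError: a connection dict with no 'state' key.
def Pre_prioritize_connections (connections : List (List (String × String))) : Prop :=
  ∀ c ∈ connections, (pvState c).isSome = true
instance (connections : List (List (String × String))) : Decidable (Pre_prioritize_connections connections) := by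
  unfold Pre_prioritize_connections; infer_instance
def pvWitness_prioritize_connections : (List (List (String × String))) :=
  [[("state", "ESTAB")], [("state", "LISTEN")]]

def Spec_prioritize_connections (connections : List (List (String × String))) (out : List (List (String × String))) : Prop := out = prioritize_connections_alt connections
instance (connections : List (List (String × String))) (out : List (List (String × String))) : Decidable (Spec_prioritize_connections connections out) := by unfold Spec_prioritize_connections; infer_instance

-- ===== CLAIM (what is proved, stated in full; the proofs are below) =====
def Claim_equal_prioritize_connections : Prop := ∀ (connections : List (List (String × String))), Dom_prioritize_connections connections → Pre_prioritize_connections connections → Spec_prioritize_connections connections (prioritize_connections connections)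

-- ===== LEMMAS AND PROOFS =====

-- inserting x between an all-not-before prefix and an all-before suffix lands exactly there
theorem insert_mid {α : Type} (before : α → α → Bool) (x : α) (ys zs : List α)
    (h1 : ∀ y ∈ ys, before x y = false) (h2 : ∀ z ∈ zs, before x z = true) :
    PySem.List.insertBy before x (ys ++ zs) = ys ++ x :: zs := by
  induction ys with
  | nil =>
    cases zs with
    | nil => simp [PySem.List.insertBy]
    | cons z t => simp [PySem.List.insertBy, h2 z (by simp)]
  | cons y t ih =>
    have hy : before x y = false := h1 y (by simp)
    simp only [List.cons_append, PySem.List.insertBy, hy, Bool.false_eq_true, if_false]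
    rw [ih (fun y hy => h1 y (by simp [hy]))]

-- pcKey on each of the four recognised states
theorem pcKey_of_state (c : List (String × String)) (s : String) (h : pvState c = some s) :
    pcKey c = ((PySem.List.index? pcOrder s).getD 0 : Nat) := by
  simp [pcKey, h]

-- the stable sort by rank is exactly the concatenation of the four state buckets
theorem sorted_buckets (xs : List (List (String × String)))
    (hx : ∀ c ∈ xs, (match pvState c with | some s => pcOrder.contains s | none => false) = true) :
    PySem.List.sorted xs pcKey =
      xs.filter (fun c => pvState c == some "ESTAB") ++
      xs.filter (fun c => pvState c == some "LISTEN") ++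
      xs.filter (fun c => pvState c == some "UDP") ++
      xs.filter (fun c => pvState c == some "OTHER") := by
  induction xs using List.reverseRecOn with
  | nil => simp [PySem.List.sorted]
  | append_singleton xs x ih =>
    have hstep : PySem.List.sorted (xs ++ [x]) pcKey =
        PySem.List.insertBy (fun a b => decide (pcKey a < pcKey b)) x (PySem.List.sorted xs pcKey) := by
      rw [PySem.List.sorted_eq_foldl_insertBy, PySem.List.sorted_eq_foldl_insertBy,
        List.foldl_append, List.foldl_cons, List.foldl_nil]
    rw [hstep, ih (fun c h => hx c (by simp [h]))]
    obtain ⟨s, hs⟩ : ∃ s, pvState x = some s := by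
      cases h : pvState x
      · have := hx x (by simp); rw [h] at this; simp at this
      · exact ⟨_, rfl⟩
    have hxx := hx x (by simp)
    rw [hs] at hxx
    have hmem : s = "ESTAB" ∨ s = "LISTEN" ∨ s = "UDP" ∨ s = "OTHER" := by
      simpa [pcOrder] using hxx
    have kE : ∀ y ∈ xs.filter (fun c => pvState c == some "ESTAB"), pcKey y = 0 := by
      intro y hy
      rw [pcKey_of_state y "ESTAB" (by simpa using (List.mem_filter.mp hy).2)]; rfl
    have kL : ∀ y ∈ xs.filter (fun c => pvState c == some "LISTEN"), pcKey y = 1 := by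
      intro y hy
      rw [pcKey_of_state y "LISTEN" (by simpa using (List.mem_filter.mp hy).2)]; rfl
    have kU : ∀ y ∈ xs.filter (fun c => pvState c == some "UDP"), pcKey y = 2 := by
      intro y hy
      rw [pcKey_of_state y "UDP" (by simpa using (List.mem_filter.mp hy).2)]; rfl
    have kO : ∀ y ∈ xs.filter (fun c => pvState c == some "OTHER"), pcKey y = 3 := by
      intro y hy
      rw [pcKey_of_state y "OTHER" (by simpa using (List.mem_filter.mp hy).2)]; rfl
    rcases hmem with h | h | h | h <;> subst h
    · have kx : pcKey x = 0 := by rw [pcKey_of_state x _ hs]; rfl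
      rw [show xs.filter (fun c => pvState c == some "ESTAB") ++
            xs.filter (fun c => pvState c == some "LISTEN") ++
            xs.filter (fun c => pvState c == some "UDP") ++
            xs.filter (fun c => pvState c == some "OTHER")
          = xs.filter (fun c => pvState c == some "ESTAB") ++
            (xs.filter (fun c => pvState c == some "LISTEN") ++
             (xs.filter (fun c => pvState c == some "UDP") ++
              xs.filter (fun c => pvState c == some "OTHER"))) from by simp [List.append_assoc]]
      rw [insert_mid _ x _ _
        (by intro y hy; simp [kx, kE y hy])
        (by intro z hz
            rcases List.mem_append.mp hz with h | h
            · simp [kx, kL z h]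
            · rcases List.mem_append.mp h with h | h
              · simp [kx, kU z h]
              · simp [kx, kO z h])]
      simp [List.filter_append, hs, List.append_assoc]
    · have kx : pcKey x = 1 := by rw [pcKey_of_state x _ hs]; rfl
      rw [show xs.filter (fun c => pvState c == some "ESTAB") ++
            xs.filter (fun c => pvState c == some "LISTEN") ++
            xs.filter (fun c => pvState c == some "UDP") ++
            xs.filter (fun c => pvState c == some "OTHER")
          = (xs.filter (fun c => pvState c == some "ESTAB") ++
             xs.filter (fun c => pvState c == some "LISTEN")) ++
            (xs.filter (fun c => pvState c == some "UDP") ++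
             xs.filter (fun c => pvState c == some "OTHER")) from by simp [List.append_assoc]]
      rw [insert_mid _ x _ _
        (by intro y hy
            rcases List.mem_append.mp hy with h | h
            · simp [kx, kE y h]
            · simp [kx, kL y h])
        (by intro z hz
            rcases List.mem_append.mp hz with h | h
            · simp [kx, kU z h]
            · simp [kx, kO z h])]
      simp [List.filter_append, hs, List.append_assoc]
    · have kx : pcKey x = 2 := by rw [pcKey_of_state x _ hs]; rfl
      rw [show xs.filter (fun c => pvState c == some "ESTAB") ++
            xs.filter (fun c => pvState c == some "LISTEN") ++
            xs.filter (fun c => pvState c == some "UDP") ++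
            xs.filter (fun c => pvState c == some "OTHER")
          = (xs.filter (fun c => pvState c == some "ESTAB") ++
             xs.filter (fun c => pvState c == some "LISTEN") ++
             xs.filter (fun c => pvState c == some "UDP")) ++
            xs.filter (fun c => pvState c == some "OTHER") from by simp [List.append_assoc]]
      rw [insert_mid _ x _ _
        (by intro y hy
            rcases List.mem_append.mp hy with h | h
            · rcases List.mem_append.mp h with h | h
              · simp [kx, kE y h]
              · simp [kx, kL y h]
            · simp [kx, kU y h])
        (by intro z hz; simp [kx, kO z hz])]
      simp [List.filter_append, hs, List.append_assoc]
    · have kx : pcKey x = 3 := by rw [pcKey_of_state x _ hs]; rfl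
      rw [show xs.filter (fun c => pvState c == some "ESTAB") ++
            xs.filter (fun c => pvState c == some "LISTEN") ++
            xs.filter (fun c => pvState c == some "UDP") ++
            xs.filter (fun c => pvState c == some "OTHER")
          = (xs.filter (fun c => pvState c == some "ESTAB") ++
             xs.filter (fun c => pvState c == some "LISTEN") ++
             xs.filter (fun c => pvState c == some "UDP") ++
             xs.filter (fun c => pvState c == some "OTHER")) ++ ([] : List (List (String × String)))
          from by simp]
      rw [insert_mid _ x _ []
        (by intro y hy
            rcases List.mem_append.mp hy with h | h
            · rcases List.mem_append.mp h with h | h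
              · rcases List.mem_append.mp h with h | h
                · simp [kx, kE y h]
                · simp [kx, kL y h]
              · simp [kx, kU y h]
            · simp [kx, kO y h])
        (by intro z hz; simp at hz)]
      simp [List.filter_append, hs, List.append_assoc]

-- pcScan over a block of ESTAB connections takes at most 3 of them
theorem pcScan_estab (E : List (List (String × String)))
    (hE : ∀ c ∈ E, pvState c = some "ESTAB") :
    ∀ (t out : List (List (String × String))) (k : Nat), k ≤ 3 → out.length + (3 - k) ≤ 4 →
    pcScan (E ++ t) out k = pcScan t (out ++ E.take (3 - k)) (min 3 (k + E.length)) := by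
  induction E with
  | nil =>
    intro t out k hk _
    simp [Nat.min_eq_right hk]
  | cons c E' ih =>
    intro t out k hk hlen
    have hc : pvState c = some "ESTAB" := hE c (by simp)
    have hne : ¬ out.length = 5 := by omega
    by_cases h3 : k = 3
    · subst h3
      simp only [List.cons_append, pcScan, hne, if_false, hc, beq_self_eq_true, if_true]
      have := ih (fun c h => hE c (by simp [h])) t out 3 (by omega) (by omega)
      rw [this]
      simp
    · simp only [List.cons_append, pcScan, hne, if_false, hc, beq_self_eq_true, if_true, h3]
      have := ih (fun c h => hE c (by simp [h])) t (out ++ [c]) (k + 1) (by omega) (by simp; omega)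
      rw [this]
      have htake : (c :: E').take (3 - k) = c :: E'.take (3 - (k + 1)) := by
        have : 3 - k = (3 - (k + 1)) + 1 := by omega
        rw [this, List.take_succ_cons]
      have hmin : min 3 (k + 1 + E'.length) = min 3 (k + (E'.length + 1)) := by omega
      simp [htake, hmin]

-- pcScan over non-ESTAB connections just fills up to 5
theorem pcScan_fill (R : List (List (String × String)))
    (hR : ∀ c ∈ R, pvState c ≠ some "ESTAB") :
    ∀ (out : List (List (String × String))) (k : Nat), out.length ≤ 5 →
    pcScan R out k = out ++ R.take (5 - out.length) := by
  induction R with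
  | nil => intro out k _; simp [pcScan]
  | cons c R' ih =>
    intro out k hlen
    by_cases h5 : out.length = 5
    · simp [pcScan, h5]
    · have hc : (pvState c == some "ESTAB") = false := by
        simpa using hR c (by simp)
      simp only [pcScan, h5, if_false, hc, Bool.false_eq_true]
      rw [ih (fun c h => hR c (by simp [h])) (out ++ [c]) k (by simp; omega)]
      have : 5 - out.length = (5 - (out.length + 1)) + 1 := by omega
      simp [this, List.take_succ_cons]

-- A's first stage (ESTAB, capped at 3) is a plain take 3
theorem stage0_eq (E : List (List (String × String))) :
    (if E ≠ [] then PySem.List.slice E none (some 3) else []) = E.take 3 := by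
  rcases eq_or_ne E [] with h | h
  · simp [h]
  · have h3 : (3 : Int) = ((3 : Nat) : Int) := rfl
    simp only [h, ne_eq, not_false_eq_true, if_true, h3, PySem.List.slice_to_natCast]

-- A's guarded fill-to-5 stage is an unconditional capped take
theorem stage_eq (r b : List (List (String × String))) (hr : r.length ≤ 5) :
    (if r.length < 5 ∧ b ≠ [] then r ++ PySem.List.slice b none (some (5 - (r.length : Int))) else r)
      = r ++ b.take (5 - r.length) := by
  rcases eq_or_ne b [] with hb | hb
  · simp [hb]
  · by_cases hlen : r.length < 5
    · rw [if_pos ⟨hlen, hb⟩]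
      have hc : (5 - (r.length : Int)) = ((5 - r.length : Nat) : Int) := by omega
      rw [hc, PySem.List.slice_to_natCast]
    · rw [if_neg (by tauto)]
      have : 5 - r.length = 0 := by omega
      rw [this, List.take_zero, List.append_nil]

theorem stage_len (r b : List (List (String × String))) (hr : r.length ≤ 5) :
    (r ++ b.take (5 - r.length)).length ≤ 5 := by
  simp only [List.length_append, List.length_take]
  omega

theorem final_slice (r : List (List (String × String))) (hr : r.length ≤ 5) :
    PySem.List.slice r none (some 5) = r := by
  have h5 : (5 : Int) = ((5 : Nat) : Int) := rfl
  rw [h5, PySem.List.slice_to_natCast, List.take_of_length_le hr]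

-- the four staged fills equal one take over the concatenated tail
theorem quad_take {α : Type} (e L U O : List α) (h : e.length ≤ 3) :
    ((e ++ L.take (5 - e.length)) ++ U.take (5 - (e ++ L.take (5 - e.length)).length)) ++
      O.take (5 - ((e ++ L.take (5 - e.length)) ++ U.take (5 - (e ++ L.take (5 - e.length)).length)).length)
    = e ++ (L ++ (U ++ O)).take (5 - e.length) := by
  rw [List.take_append, List.take_append]
  simp only [List.append_assoc, List.length_append, List.length_take]
  have e1 : 5 - (e.length + min (5 - e.length) L.length) = 5 - e.length - L.length := by omega
  have e2 : 5 - (e.length + (min (5 - e.length) L.length +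
      min (5 - e.length - L.length) U.length)) =
      5 - e.length - L.length - U.length := by omega
  rw [e1, e2]

-- ===== VERDICT (by name: the statement is the Claim_ definition above) =====
theorem prioritize_connections_spec : Claim_equal_prioritize_connections := by
  intro conns _ hpre
  unfold Spec_prioritize_connections prioritize_connections prioritize_connections_alt
  -- B side: name the four buckets
  have hmemF : ∀ c ∈ conns.filter
      (fun c => match pvState c with | some s => pcOrder.contains s | none => false),
      (match pvState c with | some s => pcOrder.contains s | none => false) = true :=
    fun c h => (List.mem_filter.mp h).2
  have collapse : ∀ st : String, st ∈ pcOrder →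
      (conns.filter (fun c => match pvState c with | some s => pcOrder.contains s | none => false)).filter
        (fun c => pvState c == some st) = conns.filter (fun c => pvState c == some st) := by
    intro st hst
    rw [List.filter_filter]
    apply List.filter_congr
    intro c _
    cases h : pvState c with
    | none => simp
    | some s =>
      by_cases hss : s = st
      · subst hss; simp [hst]
      · simp [hss]
  rw [sorted_buckets _ hmemF, collapse "ESTAB" (by simp [pcOrder]),
    collapse "LISTEN" (by simp [pcOrder]), collapse "UDP" (by simp [pcOrder]),
    collapse "OTHER" (by simp [pcOrder])]
  rw [show conns.filter (fun c => pvState c == some "ESTAB") ++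
        conns.filter (fun c => pvState c == some "LISTEN") ++
        conns.filter (fun c => pvState c == some "UDP") ++
        conns.filter (fun c => pvState c == some "OTHER")
      = conns.filter (fun c => pvState c == some "ESTAB") ++
        (conns.filter (fun c => pvState c == some "LISTEN") ++
         (conns.filter (fun c => pvState c == some "UDP") ++
          conns.filter (fun c => pvState c == some "OTHER"))) from by simp [List.append_assoc]]
  rw [pcScan_estab _ (fun c h => by simpa using (List.mem_filter.mp h).2) _ [] 0
    (by omega) (by simp)]
  rw [pcScan_fill _ (by
      intro c h
      rcases List.mem_append.mp h with h | h
      · have := (List.mem_filter.mp h).2; simp at this; simp [this]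
      · rcases List.mem_append.mp h with h | h
        · have := (List.mem_filter.mp h).2; simp at this; simp [this]
        · have := (List.mem_filter.mp h).2; simp at this; simp [this])
    _ _ (by simp [List.length_take])]
  -- A side: collapse the staged ifs
  simp only [List.nil_append, Nat.sub_zero]
  rw [stage0_eq]
  have l1 : ((conns.filter (fun c => pvState c == some "ESTAB")).take 3).length ≤ 5 := by
    simp [List.length_take]
  rw [stage_eq _ _ l1]
  have l2 : _ ≤ 5 := stage_len _ (conns.filter (fun c => pvState c == some "LISTEN")) l1
  rw [stage_eq _ _ l2]
  have l3 : _ ≤ 5 := stage_len _ (conns.filter (fun c => pvState c == some "UDP")) l2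
  rw [stage_eq _ _ l3]
  have l4 : _ ≤ 5 := stage_len _ (conns.filter (fun c => pvState c == some "OTHER")) l3
  rw [final_slice _ l4]
  exact quad_take _ _ _ _ (List.length_take_le 3 _)
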